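-- pv_equiv track=rewrite | github.com/darshanpandit/tidyfaf | src/tidyfaf/query/validation.py | validate_years
-- ===== SOURCE A (Python) =====
-- def validate_years(years):
--     """
--     Validate year inputs.
--
--     Parameters
--     ----------
--     years : list of int
--         Years to validate
--
--     Returns
--     -------
--     list of int
--         Validated years
--
--     Raises
--     ------
--     ValueError
--         If years outside valid range
--     """
--     if not isinstance(years, list):
--         years = [years]
--
--     valid_actual = list(range(2017, 2025))  # 2017-2024
--     valid_forecast = list(range(2030, 2051, 5))  # 2030, 2035, ..., 2050
--     valid_years = valid_actual + valid_forecast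
--
--     invalid = [y for y in years if y not in valid_years]
--     if invalid:
--         raise ValueError(
--             f"Invalid years: {invalid}. "
--             f"Valid years are 2017-2024 (actual) and 2030-2050 in 5-year intervals (forecast)."
--         )
--
--     return sorted(years)
-- ===== SOURCE B (Python) =====
-- _VALID_ORDER = [2017, 2018, 2019, 2020, 2021, 2022, 2023, 2024,
--                 2030, 2035, 2040, 2045, 2050]
--
--
-- def _is_valid(y):
--     return (2017 <= y <= 2024) or (2030 <= y <= 2050 and (y - 2030) % 5 == 0)
--
--
-- def validate_years(years):
--     if not isinstance(years, list):
--         years = [years]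
--
--     invalid = [y for y in years if not _is_valid(y)]
--     if invalid:
--         raise ValueError(
--             f"Invalid years: {invalid}. "
--             f"Valid years are 2017-2024 (actual) and 2030-2050 in 5-year intervals (forecast)."
--         )
--
--     # counting sort over the 13 admissible values: no comparison sort at all
--     return [v for v in _VALID_ORDER for _ in range(years.count(v))]
-- ===== Notes on version B (the rewrite author's own statement) =====
-- stated objective: alternative
-- what changed: B validates with a closed-form arithmetic predicate instead of membership in a built list, and produces the sorted result by counting-sort over the 13 admissible values instead of calling sorted().
import Mathlib
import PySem

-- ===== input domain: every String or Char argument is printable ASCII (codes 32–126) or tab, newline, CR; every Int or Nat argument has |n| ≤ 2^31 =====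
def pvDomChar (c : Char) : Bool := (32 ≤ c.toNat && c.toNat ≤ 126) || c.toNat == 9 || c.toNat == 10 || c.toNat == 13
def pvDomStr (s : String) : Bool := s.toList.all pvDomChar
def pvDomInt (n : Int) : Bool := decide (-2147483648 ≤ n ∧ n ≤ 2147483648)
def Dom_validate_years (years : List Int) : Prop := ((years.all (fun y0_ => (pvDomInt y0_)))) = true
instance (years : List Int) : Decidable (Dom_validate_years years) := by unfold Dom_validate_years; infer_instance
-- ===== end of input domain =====

-- B replaces A's membership list with a closed-form arithmetic validity test and builds the
-- sorted result by counting occurrences of the 13 admissible values instead of calling sorted().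

-- ===== PORT A =====
-- invalid years make Python A raise ValueError; those inputs are excluded by Pre_ below,
-- the port returns [] there.
def validate_years (years : List Int) : List Int :=
  let valid_actual := PySem.List.pyRange 2017 2025 1
  let valid_forecast := PySem.List.pyRange 2030 2051 5
  let valid_years := valid_actual ++ valid_forecast
  let invalid := years.filter (fun y => !(valid_years.contains y))
  if invalid ≠ [] then []   -- raise ValueError
  else PySem.List.sorted years (fun x => x) false

-- ===== PORT B =====
def validOrder : List Int :=
  [2017, 2018, 2019, 2020, 2021, 2022, 2023, 2024, 2030, 2035, 2040, 2045, 2050]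

def isValidYear (y : Int) : Bool :=
  (decide (2017 ≤ y) && decide (y ≤ 2024)) ||
  (decide (2030 ≤ y) && decide (y ≤ 2050) && decide (PySem.Int.mod (y - 2030) 5 = 0))

def validate_years_alt (years : List Int) : List Int :=
  let invalid := years.filter (fun y => !isValidYear y)
  if invalid ≠ [] then []   -- raise ValueError
  else validOrder.flatMap
    (fun v => (PySem.List.pyRange 0 (PySem.List.count years v) 1).map (fun _ => v))

-- ===== PRECONDITION & SPEC =====
-- Pre_ admits exactly the inputs on which Python A returns (all years valid); on any other
-- input A raises ValueError.
def Pre_validate_years (years : List Int) : Prop :=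
  ∀ y ∈ years, (2017 ≤ y ∧ y ≤ 2024) ∨ (2030 ≤ y ∧ y ≤ 2050 ∧ PySem.Int.mod (y - 2030) 5 = 0)
instance (years : List Int) : Decidable (Pre_validate_years years) := by
  unfold Pre_validate_years; infer_instance

def pvWitness_validate_years : List Int := [2035, 2017, 2024, 2017]

def Spec_validate_years (years : List Int) (out : List Int) : Prop := out = validate_years_alt years
instance (years : List Int) (out : List Int) : Decidable (Spec_validate_years years out) := by
  unfold Spec_validate_years; infer_instance

-- ===== CLAIM (what is proved, stated in full; the proofs are below) =====
def Claim_equal_validate_years : Prop := ∀ (years : List Int), Dom_validate_years years → Pre_validate_years years → Spec_validate_years years (validate_years years)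

-- ===== LEMMAS AND PROOFS =====

-- a valid year is one of the 13 listed values
lemma valid_mem_validOrder (y : Int)
    (h : (2017 ≤ y ∧ y ≤ 2024) ∨ (2030 ≤ y ∧ y ≤ 2050 ∧ PySem.Int.mod (y - 2030) 5 = 0)) :
    y ∈ validOrder := by
  rcases h with h | ⟨h1, h2, h3⟩
  · simp only [validOrder, List.mem_cons, List.not_mem_nil, or_false]; omega
  · rw [PySem.Int.mod_eq_zero_iff_dvd] at h3
    simp only [validOrder, List.mem_cons, List.not_mem_nil, or_false]; omega

lemma count_flat_replicate (vs ys : List Int) (hnd : vs.Nodup) (x : Int) :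
    (vs.flatMap (fun v => List.replicate (ys.count v) v)).count x
      = if x ∈ vs then ys.count x else 0 := by
  induction vs with
  | nil => simp
  | cons v vs ih =>
    rcases List.nodup_cons.mp hnd with ⟨hv, hnd'⟩
    simp only [List.flatMap_cons, List.count_append, List.count_replicate, List.mem_cons,
      ih hnd']
    by_cases hx : x = v
    · subst hx
      simp [hv]
    · simp [Ne.symm hx, hx]

lemma pairwise_flat_replicate (vs : List Int) (f : Int → Nat)
    (h : vs.Pairwise (· ≤ ·)) :
    (vs.flatMap (fun v => List.replicate (f v) v)).Pairwise (· ≤ ·) := by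
  induction vs with
  | nil => simp
  | cons v vs ih =>
    rcases List.pairwise_cons.mp h with ⟨hv, h'⟩
    simp only [List.flatMap_cons]
    rw [List.pairwise_append]
    refine ⟨?_, ih h', ?_⟩
    · rw [List.pairwise_replicate]; right; exact le_refl v
    · intro a ha b hb
      obtain ⟨u, hu, hbu⟩ := List.mem_flatMap.mp hb
      rw [List.eq_of_mem_replicate ha, List.eq_of_mem_replicate hbu]
      exact hv u hu

lemma b_out_perm (years : List Int) (hp : Pre_validate_years years) :
    (validOrder.flatMap (fun v => List.replicate (years.count v) v)).Perm years := by
  rw [List.perm_iff_count]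
  intro x
  rw [count_flat_replicate _ _ (by decide) x]
  by_cases hx : x ∈ validOrder
  · simp [hx]
  · simp only [hx, if_false]
    symm
    rw [List.count_eq_zero]
    intro hxy
    exact hx (valid_mem_validOrder x (hp x hxy))

-- the pyRange-comprehension block is a replicate
lemma block_eq_replicate (n : Nat) (v : Int) :
    (PySem.List.pyRange 0 (n : Int) 1).map (fun _ => v) = List.replicate n v := by
  have : (fun (_ : Int) => v) = Function.const Int v := rfl
  rw [this, List.map_const, PySem.List.length_pyRange_one]
  simp

-- ===== VERDICT (by name: the statement is the Claim_ definition above) =====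
theorem validate_years_spec : Claim_equal_validate_years := by
  intro years _ hp
  unfold Spec_validate_years validate_years validate_years_alt
  have hA : years.filter
      (fun y => !((PySem.List.pyRange 2017 2025 1 ++ PySem.List.pyRange 2030 2051 5).contains y))
      = [] := by
    rw [List.filter_eq_nil_iff]
    intro y hy
    have : y ∈ (PySem.List.pyRange 2017 2025 1 ++ PySem.List.pyRange 2030 2051 5) := by
      have hmem := valid_mem_validOrder y (hp y hy)
      have : (PySem.List.pyRange 2017 2025 1 ++ PySem.List.pyRange 2030 2051 5) = validOrder := by
        decide
      rw [this]; exact hmem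
    simp [this]
  have hB : years.filter (fun y => !isValidYear y) = [] := by
    rw [List.filter_eq_nil_iff]
    intro y hy
    have h := hp y hy
    suffices hv : isValidYear y = true by simp [hv]
    simp only [isValidYear, Bool.or_eq_true, Bool.and_eq_true, decide_eq_true_eq]
    tauto
  simp only [hA, hB, ne_eq, not_true_eq_false, if_false]
  have hblocks : (fun (v : Int) =>
      (PySem.List.pyRange 0 (PySem.List.count years v) 1).map (fun _ => v))
      = (fun (v : Int) => List.replicate (years.count v) v) := by
    funext v
    rw [PySem.List.count_eq, block_eq_replicate]
  rw [hblocks]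
  exact PySem.List.sorted_id_eq_of_perm_of_pairwise years _
    (b_out_perm years hp)
    (pairwise_flat_replicate validOrder (fun v => years.count v) (by decide))
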